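-- pv_equiv track=rewrite | github.com/brendonwang/algo | yoink.py | process_struct
-- ===== SOURCE A (Python) =====
-- def process_struct(lines: list[str]) -> str:
--     """
--     Processes struct definitions to make their contents one line each
--     while keeping braces separate, turning them into minimal no-format blocks
--     if template<> is found.
--     """
--     in_struct = False
--     struct_lines = []
--     output_lines = []
--
--     for line in lines:
--         if (('struct' in line and '{' in line) or ('template<' in line)) and not in_struct:
--             if 'template<' in line:
--                 output_lines.append('// @formatter:off')
--             in_struct = True
--             output_lines.append(line.strip())
--         elif in_struct and '};' in line:
--             in_struct = False
--             struct_content = ' '.join(struct_lines).strip()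
--             output_lines.append(f"{struct_content}")
--             output_lines.append(line.strip())
--             output_lines.append('// @formatter:on')
--             struct_lines = []
--         elif in_struct:
--             struct_lines.append(line.strip())
--         else:
--             output_lines.append(line.strip())
--
--     return '\n'.join(output_lines)
-- ===== SOURCE B (Python) =====
-- def process_struct(lines: list[str]) -> str:
--     out = []
--     i = 0
--     n = len(lines)
--     while i < n:
--         line = lines[i]
--         if ('struct' in line and '{' in line) or ('template<' in line):
--             if 'template<' in line:
--                 out.append('// @formatter:off')
--             out.append(line.strip())
--             i += 1
--             body = []
--             while i < n and '};' not in lines[i]: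
--                 body.append(lines[i].strip())
--                 i += 1
--             if i < n:
--                 out.append(' '.join(body).strip())
--                 out.append(lines[i].strip())
--                 out.append('// @formatter:on')
--                 i += 1
--         else:
--             out.append(line.strip())
--             i += 1
--     return '\n'.join(out)
-- ===== Notes on version B (the rewrite author's own statement) =====
-- stated objective: alternative
-- what changed: Replaces A's single fold with a boolean/accumulator state machine by an index-driven outer loop with a nested inner loop that consumes the struct body up to the closing line, so no in_struct flag or carried struct_lines state exists between iterations.
import Mathlib
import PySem

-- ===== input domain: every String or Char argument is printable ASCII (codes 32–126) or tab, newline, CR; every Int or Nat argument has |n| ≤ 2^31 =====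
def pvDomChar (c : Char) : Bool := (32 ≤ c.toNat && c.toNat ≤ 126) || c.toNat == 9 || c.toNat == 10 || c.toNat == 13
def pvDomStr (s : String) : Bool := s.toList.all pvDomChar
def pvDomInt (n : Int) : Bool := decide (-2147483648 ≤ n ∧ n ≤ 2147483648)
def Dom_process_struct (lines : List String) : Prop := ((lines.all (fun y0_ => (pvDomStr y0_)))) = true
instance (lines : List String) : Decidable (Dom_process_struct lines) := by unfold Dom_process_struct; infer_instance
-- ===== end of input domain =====

-- B replaces A's flag-carrying single pass by an outer scan with a nested body-collecting loop; same output (alternative decomposition, no speed claim).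

-- ===== PORT A =====
def pvStepA (st : Bool × List String × List String) (line : String) : Bool × List String × List String :=
  match st with
  | (inStruct, structLines, outputLines) =>
    if ((PySem.Str.isIn "struct" line && PySem.Str.isIn "{" line) || PySem.Str.isIn "template<" line) && !inStruct then
      (true, structLines,
        outputLines ++ (if PySem.Str.isIn "template<" line then ["// @formatter:off"] else []) ++ [PySem.Str.strip line])
    else if inStruct && PySem.Str.isIn "};" line then
      (false, [],
        outputLines ++ [PySem.Str.strip (PySem.Str.join " " structLines), PySem.Str.strip line, "// @formatter:on"])
    else if inStruct then
      (inStruct, structLines ++ [PySem.Str.strip line], outputLines)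
    else
      (inStruct, structLines, outputLines ++ [PySem.Str.strip line])

def process_struct (lines : List String) : String :=
  PySem.Str.join "\n" (lines.foldl pvStepA (false, [], [])).2.2

-- ===== PORT B =====
mutual
-- outer loop of Source B: scan lines, emit directly or open a block
def pvGoB : List String → List String
  | [] => []
  | l :: rest =>
    if (PySem.Str.isIn "struct" l && PySem.Str.isIn "{" l) || PySem.Str.isIn "template<" l then
      (if PySem.Str.isIn "template<" l then ["// @formatter:off"] else [])
        ++ [PySem.Str.strip l] ++ pvCloseB rest []
    else
      PySem.Str.strip l :: pvGoB rest
  termination_by xs => xs.length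
-- inner loop of Source B: collect stripped body lines until a line with '};' (unclosed: body discarded)
def pvCloseB : List String → List String → List String
  | [], _ => []
  | l :: rest, body =>
    if PySem.Str.isIn "};" l then
      PySem.Str.strip (PySem.Str.join " " body) :: PySem.Str.strip l :: "// @formatter:on" :: pvGoB rest
    else
      pvCloseB rest (body ++ [PySem.Str.strip l])
  termination_by xs _ => xs.length
end

def process_struct_alt (lines : List String) : String :=
  PySem.Str.join "\n" (pvGoB lines)

-- ===== PRECONDITION & SPEC =====
def Spec_process_struct (lines : List String) (out : String) : Prop := out = process_struct_alt lines
instance (lines : List String) (out : String) : Decidable (Spec_process_struct lines out) := by unfold Spec_process_struct; infer_instance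

-- ===== CLAIM (what is proved, stated in full; the proofs are below) =====
def Claim_equal_process_struct : Prop := ∀ (lines : List String), Dom_process_struct lines → Spec_process_struct lines (process_struct lines)

-- ===== LEMMAS AND PROOFS =====

-- Invariant linking A's fold state to B's two loops: in the "not in struct" state the fold
-- continues as pvGoB; in the "in struct, body collected" state it continues as pvCloseB.
theorem pv_key (lines : List String) :
    (∀ out : List String, (lines.foldl pvStepA (false, [], out)).2.2 = out ++ pvGoB lines) ∧
    (∀ (body out : List String), (lines.foldl pvStepA (true, body, out)).2.2 = out ++ pvCloseB lines body) := by
  induction lines with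
  | nil => simp [pvGoB, pvCloseB]
  | cons l rest ih =>
    obtain ⟨ih1, ih2⟩ := ih
    constructor
    · intro out
      simp [pvStepA, pvGoB]
      split_ifs <;> simp [ih1, ih2]
    · intro body out
      simp [pvStepA, pvCloseB]
      split_ifs <;> simp [ih1, ih2]

-- ===== VERDICT (by name: the statement is the Claim_ definition above) =====
theorem process_struct_spec : Claim_equal_process_struct := by
  intro lines _
  unfold Spec_process_struct process_struct process_struct_alt
  rw [(pv_key lines).1 []]
  simp
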